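-- pv_equiv track=rewrite | github.com/Open-Athena/helico | scripts/load_protenix.py | _map_transformer_block
-- ===== SOURCE A (Python) =====
-- _TRANSFORMER_BLOCK = {
--     "attention_pair_bias": "attention",
--     "conditioned_transition_block": "transition",
-- }
--
-- _ATTENTION_PAIR_BIAS = {
--     "layernorm_a": "ada_ln_q",
--     "layernorm_kv": "ada_ln_kv",
--     "attention.linear_q": "q_proj",
--     "attention.linear_k": "k_proj",
--     "attention.linear_v": "v_proj",
--     "attention.linear_g": "g_proj",
--     "attention.linear_o": "out_proj",
--     "layernorm_z": "z_norm",
--     "linear_nobias_z": "z_proj",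
--     "linear_a_last": "s_gate.linear",
-- }
--
-- _ADAPTIVE_LN = {
--     "layernorm_a": "norm_a",
--     "layernorm_s": "norm_s",
--     "linear_s": "scale_proj",
--     "linear_nobias_s": "shift_proj",
-- }
--
-- _CONDITIONED_TRANSITION = {
--     "adaln": "ada_ln",
--     "linear_nobias_a1": "linear_a",
--     "linear_nobias_a2": "linear_b",
--     "linear_nobias_b": "linear_out",
--     "linear_s": "s_gate.linear",
-- }
--
-- def _map_adaptive_ln(suffix: str) -> str | None:
--     """Map AdaptiveLayerNorm internal keys."""
--     for ptx, hf in _ADAPTIVE_LN.items():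
--         if suffix.startswith(ptx):
--             rest = suffix[len(ptx):]
--             # norm_a has no learnable params in Helico — skip
--             if hf == "norm_a":
--                 return None
--             return hf + rest
--     return None
--
-- def _map_conditioned_transition(suffix: str) -> str | None:
--     """Map ConditionedTransitionBlock internal keys."""
--     for ptx, hf in _CONDITIONED_TRANSITION.items():
--         if suffix.startswith(ptx):
--             rest = suffix[len(ptx):]
--             if rest.startswith("."):
--                 # Recurse into adaln
--                 if hf == "ada_ln":
--                     inner = _map_adaptive_ln(rest[1:])
--                     if inner is None:
--                         return None
--                     return hf + "." + inner
--                 return hf + rest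
--             return hf + rest
--     return None
--
-- def _map_attention_pair_bias(suffix: str) -> str | None:
--     """Map AttentionPairBias internal keys."""
--     for ptx, hf in _ATTENTION_PAIR_BIAS.items():
--         if suffix.startswith(ptx):
--             rest = suffix[len(ptx):]
--             if rest.startswith("."):
--                 # Recurse into adaptive LN
--                 if hf in ("ada_ln_q", "ada_ln_kv"):
--                     inner = _map_adaptive_ln(rest[1:])
--                     if inner is None:
--                         return None
--                     return hf + "." + inner
--                 return hf + rest
--             return hf + rest
--     return None
--
-- def _map_transformer_block(suffix: str) -> str | None:
--     """Map DiffusionTransformerBlock internal keys."""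
--     for ptx, hf in _TRANSFORMER_BLOCK.items():
--         if suffix.startswith(ptx):
--             rest = suffix[len(ptx):]
--             if rest.startswith("."):
--                 inner_suffix = rest[1:]
--                 if hf == "attention":
--                     mapped = _map_attention_pair_bias(inner_suffix)
--                 elif hf == "transition":
--                     mapped = _map_conditioned_transition(inner_suffix)
--                 else:
--                     mapped = None
--                 if mapped is None:
--                     return None
--                 return hf + "." + mapped
--             return hf + rest
--     return None
-- ===== SOURCE B (Python) =====
-- # One generic table-driven recursive mapper replacing A's four hand-written functions.
-- # Each config level is a list of (prefix, replacement, sub_level_or_None, skip) entries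
-- # in the original dicts' insertion order.
--
-- _ADA_CFG = [
--     ("layernorm_a", "norm_a", None, True),   # norm_a has no learnable params — skip
--     ("layernorm_s", "norm_s", None, False),
--     ("linear_s", "scale_proj", None, False),
--     ("linear_nobias_s", "shift_proj", None, False),
-- ]
--
-- _ATT_CFG = [
--     ("layernorm_a", "ada_ln_q", _ADA_CFG, False),
--     ("layernorm_kv", "ada_ln_kv", _ADA_CFG, False),
--     ("attention.linear_q", "q_proj", None, False),
--     ("attention.linear_k", "k_proj", None, False),
--     ("attention.linear_v", "v_proj", None, False),
--     ("attention.linear_g", "g_proj", None, False),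
--     ("attention.linear_o", "out_proj", None, False),
--     ("layernorm_z", "z_norm", None, False),
--     ("linear_nobias_z", "z_proj", None, False),
--     ("linear_a_last", "s_gate.linear", None, False),
-- ]
--
-- _TRN_CFG = [
--     ("adaln", "ada_ln", _ADA_CFG, False),
--     ("linear_nobias_a1", "linear_a", None, False),
--     ("linear_nobias_a2", "linear_b", None, False),
--     ("linear_nobias_b", "linear_out", None, False),
--     ("linear_s", "s_gate.linear", None, False),
-- ]
--
-- _TOP_CFG = [
--     ("attention_pair_bias", "attention", _ATT_CFG, False),
--     ("conditioned_transition_block", "transition", _TRN_CFG, False),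
-- ]
--
-- def _map_level(level, suffix):
--     for ptx, repl, sub, skip in level:
--         if suffix.startswith(ptx):
--             if skip:
--                 return None
--             rest = suffix[len(ptx):]
--             if rest.startswith(".") and sub is not None:
--                 inner = _map_level(sub, rest[1:])
--                 if inner is None:
--                     return None
--                 return repl + "." + inner
--             return repl + rest
--     return None
--
-- def _map_transformer_block(suffix: str):
--     """Map DiffusionTransformerBlock internal keys."""
--     return _map_level(_TOP_CFG, suffix)
-- ===== Notes on version B (the rewrite author's own statement) =====
-- stated objective: simpler
-- what changed: Replaces the four near-duplicate hand-written mapping functions with one generic recursive mapper driven by a nested (prefix, replacement, sub-level, skip) config table that encodes the dict ordering, the norm_a skip and which entries recurse.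
import Mathlib
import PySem

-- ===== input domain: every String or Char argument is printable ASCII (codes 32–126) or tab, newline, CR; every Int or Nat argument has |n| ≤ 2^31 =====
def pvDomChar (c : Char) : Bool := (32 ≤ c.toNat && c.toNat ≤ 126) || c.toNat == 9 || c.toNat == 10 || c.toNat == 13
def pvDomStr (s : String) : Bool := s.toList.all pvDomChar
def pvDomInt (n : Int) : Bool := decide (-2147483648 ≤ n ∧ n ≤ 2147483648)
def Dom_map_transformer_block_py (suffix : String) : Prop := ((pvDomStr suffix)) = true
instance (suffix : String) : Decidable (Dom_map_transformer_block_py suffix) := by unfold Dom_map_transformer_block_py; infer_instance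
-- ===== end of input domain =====

-- B replaces A's four near-duplicate mapping functions by one generic recursive mapper
-- driven by a nested (prefix, replacement, sub-level, skip) config table (objective: simpler).

-- ===== PORT A =====
def pvA_ADAPTIVE_LN : List (String × String) :=
  [("layernorm_a", "norm_a"), ("layernorm_s", "norm_s"),
   ("linear_s", "scale_proj"), ("linear_nobias_s", "shift_proj")]

def pvA_ATTENTION_PAIR_BIAS : List (String × String) :=
  [("layernorm_a", "ada_ln_q"), ("layernorm_kv", "ada_ln_kv"),
   ("attention.linear_q", "q_proj"), ("attention.linear_k", "k_proj"),
   ("attention.linear_v", "v_proj"), ("attention.linear_g", "g_proj"),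
   ("attention.linear_o", "out_proj"), ("layernorm_z", "z_norm"),
   ("linear_nobias_z", "z_proj"), ("linear_a_last", "s_gate.linear")]

def pvA_CONDITIONED_TRANSITION : List (String × String) :=
  [("adaln", "ada_ln"), ("linear_nobias_a1", "linear_a"),
   ("linear_nobias_a2", "linear_b"), ("linear_nobias_b", "linear_out"),
   ("linear_s", "s_gate.linear")]

def pvA_mapAdaptiveLnLoop : List (String × String) → String → Option String
  | [], _ => none
  | (ptx, hf) :: tl, suffix =>
    if PySem.Str.startswith suffix ptx then
      let rest := PySem.Str.slice suffix (some (PySem.Str.len ptx)) none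
      -- norm_a has no learnable params — skip
      if hf == "norm_a" then none
      else some (hf ++ rest)
    else pvA_mapAdaptiveLnLoop tl suffix

def pvA_map_adaptive_ln (suffix : String) : Option String :=
  pvA_mapAdaptiveLnLoop pvA_ADAPTIVE_LN suffix

def pvA_mapConditionedTransitionLoop : List (String × String) → String → Option String
  | [], _ => none
  | (ptx, hf) :: tl, suffix =>
    if PySem.Str.startswith suffix ptx then
      let rest := PySem.Str.slice suffix (some (PySem.Str.len ptx)) none
      if PySem.Str.startswith rest "." then
        if hf == "ada_ln" then
          match pvA_map_adaptive_ln (PySem.Str.slice rest (some 1) none) with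
          | none => none
          | some inner => some (hf ++ "." ++ inner)
        else some (hf ++ rest)
      else some (hf ++ rest)
    else pvA_mapConditionedTransitionLoop tl suffix

def pvA_map_conditioned_transition (suffix : String) : Option String :=
  pvA_mapConditionedTransitionLoop pvA_CONDITIONED_TRANSITION suffix

def pvA_mapAttentionPairBiasLoop : List (String × String) → String → Option String
  | [], _ => none
  | (ptx, hf) :: tl, suffix =>
    if PySem.Str.startswith suffix ptx then
      let rest := PySem.Str.slice suffix (some (PySem.Str.len ptx)) none
      if PySem.Str.startswith rest "." then
        if hf == "ada_ln_q" || hf == "ada_ln_kv" then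
          match pvA_map_adaptive_ln (PySem.Str.slice rest (some 1) none) with
          | none => none
          | some inner => some (hf ++ "." ++ inner)
        else some (hf ++ rest)
      else some (hf ++ rest)
    else pvA_mapAttentionPairBiasLoop tl suffix

def pvA_map_attention_pair_bias (suffix : String) : Option String :=
  pvA_mapAttentionPairBiasLoop pvA_ATTENTION_PAIR_BIAS suffix

def pvA_TRANSFORMER_BLOCK : List (String × String) :=
  [("attention_pair_bias", "attention"), ("conditioned_transition_block", "transition")]

def pvA_mapTransformerBlockLoop : List (String × String) → String → Option String
  | [], _ => none
  | (ptx, hf) :: tl, suffix =>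
    if PySem.Str.startswith suffix ptx then
      let rest := PySem.Str.slice suffix (some (PySem.Str.len ptx)) none
      if PySem.Str.startswith rest "." then
        let innerSuffix := PySem.Str.slice rest (some 1) none
        let mapped :=
          if hf == "attention" then pvA_map_attention_pair_bias innerSuffix
          else if hf == "transition" then pvA_map_conditioned_transition innerSuffix
          else none
        match mapped with
        | none => none
        | some m => some (hf ++ "." ++ m)
      else some (hf ++ rest)
    else pvA_mapTransformerBlockLoop tl suffix

def map_transformer_block_py (suffix : String) : Option String :=
  pvA_mapTransformerBlockLoop pvA_TRANSFORMER_BLOCK suffix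

-- ===== PORT B =====
-- A config level: .nil, or an entry (prefix, replacement, hasSub+sub level, skip) and the
-- remaining entries of the level (explicit child encoding instead of List/Option nesting).
inductive pvCfg : Type
  | nil : pvCfg
  | cons : String → String → Bool → pvCfg → Bool → pvCfg → pvCfg
deriving DecidableEq, Repr

def pvCfgAda : pvCfg :=
  .cons "layernorm_a" "norm_a" false .nil true (       -- skip: norm_a has no params
  .cons "layernorm_s" "norm_s" false .nil false (
  .cons "linear_s" "scale_proj" false .nil false (
  .cons "linear_nobias_s" "shift_proj" false .nil false .nil)))

def pvCfgAtt : pvCfg :=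
  .cons "layernorm_a" "ada_ln_q" true pvCfgAda false (
  .cons "layernorm_kv" "ada_ln_kv" true pvCfgAda false (
  .cons "attention.linear_q" "q_proj" false .nil false (
  .cons "attention.linear_k" "k_proj" false .nil false (
  .cons "attention.linear_v" "v_proj" false .nil false (
  .cons "attention.linear_g" "g_proj" false .nil false (
  .cons "attention.linear_o" "out_proj" false .nil false (
  .cons "layernorm_z" "z_norm" false .nil false (
  .cons "linear_nobias_z" "z_proj" false .nil false (
  .cons "linear_a_last" "s_gate.linear" false .nil false .nil)))))))))

def pvCfgTrn : pvCfg :=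
  .cons "adaln" "ada_ln" true pvCfgAda false (
  .cons "linear_nobias_a1" "linear_a" false .nil false (
  .cons "linear_nobias_a2" "linear_b" false .nil false (
  .cons "linear_nobias_b" "linear_out" false .nil false (
  .cons "linear_s" "s_gate.linear" false .nil false .nil))))

def pvCfgTop : pvCfg :=
  .cons "attention_pair_bias" "attention" true pvCfgAtt false (
  .cons "conditioned_transition_block" "transition" true pvCfgTrn false .nil)

def pvB_mapLevel : pvCfg → String → Option String
  | .nil, _ => none
  | .cons ptx repl hasSub sub skip tl, suffix =>
    if PySem.Str.startswith suffix ptx then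
      if skip then none
      else
        let rest := PySem.Str.slice suffix (some (PySem.Str.len ptx)) none
        if PySem.Str.startswith rest "." && hasSub then
          match pvB_mapLevel sub (PySem.Str.slice rest (some 1) none) with
          | none => none
          | some inner => some (repl ++ "." ++ inner)
        else some (repl ++ rest)
    else pvB_mapLevel tl suffix

def map_transformer_block_py_alt (suffix : String) : Option String :=
  pvB_mapLevel pvCfgTop suffix

-- ===== PRECONDITION & SPEC =====
def Spec_map_transformer_block_py (suffix : String) (out : Option String) : Prop := out = map_transformer_block_py_alt suffix
instance (suffix : String) (out : Option String) : Decidable (Spec_map_transformer_block_py suffix out) := by unfold Spec_map_transformer_block_py; infer_instance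

-- ===== CLAIM (what is proved, stated in full; the proofs are below) =====
def Claim_equal_map_transformer_block_py : Prop := ∀ (suffix : String), Dom_map_transformer_block_py suffix → Spec_map_transformer_block_py suffix (map_transformer_block_py suffix)

-- ===== LEMMAS AND PROOFS =====
theorem pvAda_eq (s : String) : pvA_map_adaptive_ln s = pvB_mapLevel pvCfgAda s := by
  simp only [pvA_map_adaptive_ln, pvA_ADAPTIVE_LN, pvA_mapAdaptiveLnLoop,
    pvB_mapLevel, pvCfgAda, String.reduceBEq, Bool.false_eq_true, if_false, if_true,
    Bool.and_false]

theorem pvAtt_eq (s : String) : pvA_map_attention_pair_bias s = pvB_mapLevel pvCfgAtt s := by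
  simp only [pvA_map_attention_pair_bias, pvA_ATTENTION_PAIR_BIAS, pvA_mapAttentionPairBiasLoop,
    pvB_mapLevel, pvCfgAtt, pvAda_eq, String.reduceBEq, Bool.false_eq_true, if_false, if_true, ite_self,
    Bool.and_false, Bool.and_true, Bool.or_false, Bool.or_true]

theorem pvTrn_eq (s : String) : pvA_map_conditioned_transition s = pvB_mapLevel pvCfgTrn s := by
  simp only [pvA_map_conditioned_transition, pvA_CONDITIONED_TRANSITION, pvA_mapConditionedTransitionLoop,
    pvB_mapLevel, pvCfgTrn, pvAda_eq, String.reduceBEq, Bool.false_eq_true, if_false, if_true, ite_self,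
    Bool.and_false, Bool.and_true]

-- ===== VERDICT (by name: the statement is the Claim_ definition above) =====
theorem map_transformer_block_py_spec : Claim_equal_map_transformer_block_py := by
  intro s _
  unfold Spec_map_transformer_block_py
  simp only [map_transformer_block_py, map_transformer_block_py_alt,
    pvA_TRANSFORMER_BLOCK, pvA_mapTransformerBlockLoop, pvB_mapLevel, pvCfgTop,
    pvAtt_eq, pvTrn_eq, String.reduceBEq, Bool.false_eq_true, if_false, if_true, Bool.and_true]
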